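-- pv_equiv track=rewrite | github.com/BenBurdsall/wordle | letterTally.py | _findMaxInDict
-- ===== SOURCE A (Python) =====
-- def _findMaxInDict(dict):
--     keys = list(dict)
--     firstKey = keys[0]
--     hf = dict[firstKey]
--     letter = firstKey
--     for key in keys:
--         cf = dict[key]
--         # if the cf frequency has higher than the recorded highest  -record a new highest and key
--         if cf > hf:
--             hf =cf
--             letter =key
--     return hf,letter
-- ===== SOURCE B (Python) =====
-- def _findMaxInDict(dict):
--     pairs = sorted(dict.items(), key=lambda kv: kv[1], reverse=True)
--     top = pairs[0]
--     return top[1], top[0]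
-- ===== Notes on version B (the rewrite author's own statement) =====
-- stated objective: simpler
-- what changed: Replaces the explicit running-max loop (strict-> update over the key list with per-key lookups) by a stable descending sort of the items and taking the first pair; CPython's stable sort with reverse=True keeps the earliest key on ties, matching A's strict-> rule.
import Mathlib
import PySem

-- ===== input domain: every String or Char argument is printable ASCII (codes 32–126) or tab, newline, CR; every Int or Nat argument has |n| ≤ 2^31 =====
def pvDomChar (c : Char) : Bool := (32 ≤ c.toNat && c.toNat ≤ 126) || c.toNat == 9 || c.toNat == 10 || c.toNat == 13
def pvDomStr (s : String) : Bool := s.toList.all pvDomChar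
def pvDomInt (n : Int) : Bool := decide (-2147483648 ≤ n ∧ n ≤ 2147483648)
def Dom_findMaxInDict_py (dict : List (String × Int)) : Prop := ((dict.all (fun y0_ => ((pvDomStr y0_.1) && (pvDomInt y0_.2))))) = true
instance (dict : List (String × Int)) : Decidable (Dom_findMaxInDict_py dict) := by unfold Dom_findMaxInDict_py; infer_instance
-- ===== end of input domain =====

-- B replaces A's running-max loop by a stable descending sort of the items plus taking the
-- first pair (simpler, one library call); both raise IndexError on an empty dict (excluded by Pre_).

-- ===== PORT A =====
def findMaxInDict_py (dict : List (String × Int)) : Int × String :=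
  let d := PySem.Dict.ofList dict
  let keys := d.keys                               -- keys = list(dict)
  match PySem.List.pyGet? keys 0 with              -- firstKey = keys[0]
  | none => (0, "")                                -- IndexError on empty dict; excluded by Pre_
  | some firstKey =>
    let hf := d.getD firstKey 0                    -- hf = dict[firstKey] (firstKey ∈ keys, so present)
    let letter := firstKey
    keys.foldl (fun (acc : Int × String) key =>
      let cf := d.getD key 0                       -- cf = dict[key] (key ∈ keys, so present)
      if acc.1 < cf then (cf, key) else acc)       -- if cf > hf: hf, letter = cf, key
      (hf, letter)

-- ===== PORT B =====
def findMaxInDict_py_alt (dict : List (String × Int)) : Int × String :=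
  let pairs := PySem.List.sorted (PySem.Dict.ofList dict).items (fun kv => kv.2) true
  match PySem.List.pyGet? pairs 0 with             -- top = pairs[0]
  | none => (0, "")                                -- IndexError on empty dict; excluded by Pre_
  | some top => (top.2, top.1)

-- ===== PRECONDITION & SPEC =====
-- A raises IndexError (keys[0]) on the empty dict; B's pairs[0] raises there too.
def Pre_findMaxInDict_py (dict : List (String × Int)) : Prop := dict ≠ []
instance (dict : List (String × Int)) : Decidable (Pre_findMaxInDict_py dict) := by unfold Pre_findMaxInDict_py; infer_instance
def pvWitness_findMaxInDict_py : (List (String × Int)) := [("a", 1), ("b", 2)]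

def Spec_findMaxInDict_py (dict : List (String × Int)) (out : Int × String) : Prop := out = findMaxInDict_py_alt dict
instance (dict : List (String × Int)) (out : Int × String) : Decidable (Spec_findMaxInDict_py dict out) := by unfold Spec_findMaxInDict_py; infer_instance

-- ===== CLAIM (what is proved, stated in full; the proofs are below) =====
def Claim_equal_findMaxInDict_py : Prop := ∀ (dict : List (String × Int)), Dom_findMaxInDict_py dict → Pre_findMaxInDict_py dict → Spec_findMaxInDict_py dict (findMaxInDict_py dict)

-- ===== LEMMAS AND PROOFS =====

-- the running "first maximum" pick, shared characterisation of both sides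
def pvPick (m y : String × Int) : String × Int := if m.2 < y.2 then y else m

-- A's loop over items, with the swapped (value, key) accumulator, is pvPick composed with a swap
theorem pvFoldSwap (l : List (String × Int)) : ∀ (m : String × Int),
    l.foldl (fun (acc : Int × String) q => if acc.1 < q.2 then (q.2, q.1) else acc) (m.2, m.1)
      = ((l.foldl pvPick m).2, (l.foldl pvPick m).1) := by
  induction l with
  | nil => intro m; rfl
  | cons x t ih =>
    intro m
    simp only [List.foldl_cons, pvPick]
    by_cases h : m.2 < x.2 <;> simp [h, ih]

-- head of the insertBy accumulation: inserting into a nonempty accumulator updates the head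
-- exactly by the pvPick rule (stability of Python's sort: ties keep the earlier element first)
theorem pvHeadFoldlInsertBy (l : List (String × Int)) : ∀ (h : String × Int) (t : List (String × Int)),
    ∃ t', List.foldl (fun acc x => PySem.List.insertBy (fun a b => decide (b.2 < a.2)) x acc) (h :: t) l
      = (l.foldl pvPick h) :: t' := by
  induction l with
  | nil => intro h t; exact ⟨t, rfl⟩
  | cons x l' ih =>
    intro h t
    simp only [List.foldl_cons, PySem.List.insertBy, pvPick]
    by_cases hc : h.2 < x.2
    · simpa [hc] using ih x (h :: t)
    · simpa [hc] using ih h (PySem.List.insertBy (fun a b => decide (b.2 < a.2)) x t)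

-- head of the stable descending sort of a nonempty list is the first maximum
theorem pvHeadSortedRev (p : String × Int) (rest : List (String × Int)) :
    ∃ t', PySem.List.sorted (p :: rest) (fun kv => kv.2) true = (rest.foldl pvPick p) :: t' := by
  rw [PySem.List.sorted_rev_eq_foldl_insertBy]
  simpa [PySem.List.insertBy] using pvHeadFoldlInsertBy rest p []

-- the Dict built from the input has a nonempty items list when the input is nonempty
theorem pvLeLengthInsert {κ ν : Type} [BEq κ] (d : PySem.Dict κ ν) (k : κ) (v : ν) :
    d.items.length ≤ (d.insert k v).items.length := by
  simp only [PySem.Dict.insert]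
  split <;> simp
theorem pvLeLengthUpdate {κ ν : Type} [BEq κ] (ps : List (κ × ν)) :
    ∀ (d : PySem.Dict κ ν), d.items.length ≤ (d.update ps).items.length := by
  induction ps with
  | nil => intro d; simp [PySem.Dict.update]
  | cons p ps ih =>
    intro d
    have h1 := pvLeLengthInsert d p.1 p.2
    have h2 := ih (d.insert p.1 p.2)
    simp only [PySem.Dict.update, List.foldl_cons] at *
    omega
theorem pvItemsOfListNeNil (p : String × Int) (ps : List (String × Int)) :
    (PySem.Dict.ofList (p :: ps)).items ≠ [] := by
  have h0 : (PySem.Dict.empty.insert p.1 p.2 : PySem.Dict String Int).items.length = 1 := by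
    simp [PySem.Dict.insert, PySem.Dict.empty, PySem.Dict.contains]
  have h := pvLeLengthUpdate ps (PySem.Dict.empty.insert p.1 p.2 : PySem.Dict String Int)
  have : (PySem.Dict.ofList (p :: ps)).items.length ≠ 0 := by
    simp only [PySem.Dict.ofList, PySem.Dict.update, List.foldl_cons] at *
    omega
  intro hnil
  simp [hnil] at this

theorem findMaxInDict_py_spec : Claim_equal_findMaxInDict_py := by
  intro dict _ hpre
  unfold Spec_findMaxInDict_py findMaxInDict_py findMaxInDict_py_alt
  simp only []
  -- the items list of the dict is nonempty
  obtain ⟨q, qs, hdict⟩ : ∃ q qs, dict = q :: qs := by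
    cases dict with
    | nil => exact absurd rfl hpre
    | cons q qs => exact ⟨q, qs, rfl⟩
  set d := PySem.Dict.ofList dict with hd
  have hne : d.items ≠ [] := by rw [hd, hdict]; exact pvItemsOfListNeNil q qs
  obtain ⟨p, rest, hitems⟩ : ∃ p rest, d.items = p :: rest := by
    cases hi : d.items with
    | nil => exact absurd hi hne
    | cons p rest => exact ⟨p, rest, rfl⟩
  have hnodup : d.keys.Nodup := PySem.Dict.nodup_keys_ofList dict
  -- every lookup in A's loop returns the value stored at that item
  have hlook : ∀ r ∈ d.items, d.getD r.1 0 = r.2 := by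
    intro r hr
    exact PySem.Dict.getD_of_get?_eq_some d 0
      (PySem.Dict.get?_of_mem_items d (by simpa using hr) hnodup)
  have hkeys : d.keys = p.1 :: rest.map (fun x => x.1) := by
    simp [PySem.Dict.keys, hitems]
  -- A side: keys[0] and the initial lookup
  rw [hkeys]
  rw [PySem.List.pyGet?_zero_cons]
  simp only
  have hp : d.getD p.1 0 = p.2 := hlook p (by simp [hitems])
  rw [hp]
  -- turn A's fold over keys into a fold over items
  have hfold :
      (p.1 :: rest.map (fun x => x.1)).foldl (fun (acc : Int × String) key =>
          if acc.1 < d.getD key 0 then (d.getD key 0, key) else acc) (p.2, p.1)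
        = (p :: rest).foldl (fun (acc : Int × String) r =>
          if acc.1 < r.2 then (r.2, r.1) else acc) (p.2, p.1) := by
    rw [show (p.1 :: rest.map (fun x => x.1)) = (p :: rest).map (fun x => x.1) from rfl,
        List.foldl_map]
    refine PySem.List.foldl_congr_mem' _ _ _ _ ?_
    intro r hr acc
    rw [hlook r (by rw [hitems]; exact hr)]
  rw [hfold]
  -- the first loop step is a no-op, then swap to the pvPick fold
  have hstep : (p :: rest).foldl (fun (acc : Int × String) r =>
      if acc.1 < r.2 then (r.2, r.1) else acc) (p.2, p.1)
      = ((rest.foldl pvPick p).2, (rest.foldl pvPick p).1) := by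
    rw [List.foldl_cons, if_neg (lt_irrefl p.2), pvFoldSwap]
  rw [hstep]
  -- B side: head of the stable descending sort is the same first maximum
  obtain ⟨t', hsort⟩ := pvHeadSortedRev p rest
  rw [hitems, hsort, PySem.List.pyGet?_zero_cons]
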